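-- pv_equiv track=rewrite | github.com/AeluApp/mandarin | mandarin/tone_features.py | _even_split
-- ===== SOURCE A (Python) =====
-- def _even_split(total_len: int, n: int) -> list[tuple[int, int]]:
--     """Even-split fallback."""
--     seg_len = total_len // n if n > 0 else total_len
--     segments = []
--     for i in range(n):
--         start = i * seg_len
--         end = start + seg_len if i < n - 1 else total_len
--         segments.append((start, end))
--     return segments
-- ===== SOURCE B (Python) =====
-- def _even_split(total_len: int, n: int) -> list[tuple[int, int]]:
--     """Even-split fallback: divide-and-conquer on the index interval [lo, hi):
--     split at the midpoint and concatenate the two halves' segment lists; a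
--     singleton interval yields one segment (the last one ends at total_len)."""
--     if n <= 0:
--         return []
--     seg_len = total_len // n
--
--     def segs(lo: int, hi: int) -> list[tuple[int, int]]:
--         if hi - lo == 1:
--             return [(lo * seg_len, total_len if lo == n - 1 else (lo + 1) * seg_len)]
--         mid = lo + (hi - lo) // 2
--         return segs(lo, mid) + segs(mid, hi)
--
--     return segs(0, n)
-- ===== Notes on version B (the rewrite author's own statement) =====
-- stated objective: alternative
-- what changed: B computes the segment list by divide-and-conquer recursion on the index interval (split at the midpoint, concatenate the halves, singleton interval = one segment) instead of A's linear indexed loop with a last-iteration conditional.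
import Mathlib
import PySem

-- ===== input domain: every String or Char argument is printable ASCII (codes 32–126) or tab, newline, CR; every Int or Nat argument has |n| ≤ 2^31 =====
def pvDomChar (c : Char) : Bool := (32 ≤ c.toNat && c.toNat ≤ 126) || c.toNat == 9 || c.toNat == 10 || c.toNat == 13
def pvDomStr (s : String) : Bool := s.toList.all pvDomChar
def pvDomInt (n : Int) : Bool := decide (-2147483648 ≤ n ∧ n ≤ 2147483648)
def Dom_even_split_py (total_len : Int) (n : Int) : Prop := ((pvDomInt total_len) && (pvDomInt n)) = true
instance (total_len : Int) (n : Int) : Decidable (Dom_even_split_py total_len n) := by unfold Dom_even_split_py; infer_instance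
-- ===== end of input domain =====

-- B computes the segments by divide-and-conquer on the index interval (split at the
-- midpoint, concatenate the halves) instead of A's linear indexed loop (alternative).

-- ===== PORT A =====
def even_split_py (total_len : Int) (n : Int) : List (Int × Int) :=
  let seg_len : Int := if n > 0 then PySem.Int.floordiv total_len n else total_len
  (PySem.List.pyRange 0 n 1).foldl
    (fun segments i =>
      let start := i * seg_len
      let «end» := if i < n - 1 then start + seg_len else total_len
      segments ++ [(start, «end»)])
    []

-- ===== PORT B =====
-- 'segs' from Source B: divide-and-conquer on [lo, hi); fuel = interval length bounds the
-- recursion depth (always enough when called as in even_split_py_alt)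
def even_split_segs (total_len seg_len n : Int) : Nat → Int → Int → List (Int × Int)
  | 0, _, _ => []                                 -- unreachable with adequate fuel
  | (fuel + 1), lo, hi =>
      if hi - lo == 1 then
        [(lo * seg_len, if lo == n - 1 then total_len else (lo + 1) * seg_len)]
      else
        let mid := lo + PySem.Int.floordiv (hi - lo) 2
        even_split_segs total_len seg_len n fuel lo mid ++
          even_split_segs total_len seg_len n fuel mid hi

def even_split_py_alt (total_len : Int) (n : Int) : List (Int × Int) :=
  if n ≤ 0 then []
  else
    let seg_len := PySem.Int.floordiv total_len n
    even_split_segs total_len seg_len n n.toNat 0 n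

-- ===== PRECONDITION & SPEC =====
def Spec_even_split_py (total_len : Int) (n : Int) (out : List (Int × Int)) : Prop := out = even_split_py_alt total_len n
instance (total_len : Int) (n : Int) (out : List (Int × Int)) : Decidable (Spec_even_split_py total_len n out) := by unfold Spec_even_split_py; infer_instance

-- ===== CLAIM (what is proved, stated in full; the proofs are below) =====
def Claim_equal_even_split_py : Prop := ∀ (total_len : Int) (n : Int), Dom_even_split_py total_len n → Spec_even_split_py total_len n (even_split_py total_len n)

-- ===== LEMMAS AND PROOFS =====

-- on any index interval [lo, hi) inside [0, n), B's divide-and-conquer produces exactly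
-- A's per-index segment list over range(lo, hi)
theorem segs_eq_map (T L n : Int) : ∀ (fuel : Nat) (lo hi : Int),
    lo < hi → hi ≤ n → (hi - lo).toNat ≤ fuel →
    even_split_segs T L n fuel lo hi
      = (PySem.List.pyRange lo hi 1).map
          (fun i => (i * L, if i < n - 1 then i * L + L else T)) := by
  intro fuel
  induction fuel with
  | zero => intro lo hi h1 _ h3; omega
  | succ f ih =>
      intro lo hi h1 h2 h3
      by_cases hone : hi - lo = 1
      · have hhi : hi = lo + 1 := by omega
        subst hhi
        rw [PySem.List.pyRange_one_singleton]
        by_cases hlast : lo = n - 1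
        · have : ¬ lo < n - 1 := by omega
          simp [even_split_segs, hone, hlast, this]
        · have hlt : lo < n - 1 := by omega
          simp [even_split_segs, hlast, hlt]
          ring
      · have hd : PySem.Int.floordiv (hi - lo) 2 = (hi - lo) / 2 :=
          PySem.Int.floordiv_eq_ediv_of_pos (by omega)
        have hmid1 : lo < lo + (hi - lo) / 2 := by omega
        have hmid2 : lo + (hi - lo) / 2 < hi := by omega
        rw [show even_split_segs T L n (f + 1) lo hi
              = even_split_segs T L n f lo (lo + PySem.Int.floordiv (hi - lo) 2) ++
                  even_split_segs T L n f (lo + PySem.Int.floordiv (hi - lo) 2) hi by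
              simp [even_split_segs, hone]]
        rw [hd, ih lo (lo + (hi - lo) / 2) hmid1 (by omega) (by omega),
            ih (lo + (hi - lo) / 2) hi hmid2 h2 (by omega),
            ← List.map_append,
            ← PySem.List.pyRange_one_append lo (lo + (hi - lo) / 2) hi (by omega) (by omega)]

-- ===== VERDICT (by name: the statement is the Claim_ definition above) =====
theorem even_split_py_spec : Claim_equal_even_split_py := by
  intro total_len n _
  unfold Spec_even_split_py even_split_py even_split_py_alt
  by_cases hn : n ≤ 0
  · simp [hn, PySem.List.pyRange_one_eq_nil hn]
  · have hpos : 0 < n := by omega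
    simp only [hn, if_false, if_pos hpos]
    rw [PySem.List.foldl_append_singleton_eq_map,
        segs_eq_map total_len (PySem.Int.floordiv total_len n) n n.toNat 0 n hpos
          le_rfl (by omega)]
    simp
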